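-- pv_equiv track=rewrite | github.com/ReZonArc/esm-2-keras-esm2_t6_8m-v1-hyper-dev1 | tensor_shape_types.py | factorization_signature
-- ===== SOURCE A (Python) =====
-- from typing import Dict, List, Tuple, Set, Any, Optional
-- from collections import defaultdict
--
-- def factorization_signature(factors: List[int]) -> str:
--     """Create a unique string signature from prime factorization.
--
--     Args:
--         factors: List of prime factors
--
--     Returns:
--         String signature like "2^3*3^1*5^2"
--     """
--     if not factors:
--         return "1"
--
--     factor_counts = defaultdict(int)
--     for f in factors:
--         factor_counts[f] += 1
--
--     signature_parts = []
--     for prime in sorted(factor_counts.keys()):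
--         count = factor_counts[prime]
--         if count == 1:
--             signature_parts.append(str(prime))
--         else:
--             signature_parts.append(f"{prime}^{count}")
--
--     return "*".join(signature_parts)
-- ===== SOURCE B (Python) =====
-- from itertools import groupby
--
-- def factorization_signature(factors):
--     """Sort once, then walk consecutive runs of equal primes (groupby)."""
--     if not factors:
--         return "1"
--     parts = []
--     for prime, group in groupby(sorted(factors)):
--         n = sum(1 for _ in group)
--         parts.append(str(prime) if n == 1 else f"{prime}^{n}")
--     return "*".join(parts)
-- ===== Notes on version B (the rewrite author's own statement) =====
-- stated objective: idiomatic
-- what changed: Replaces the defaultdict counting pass plus sorted-keys lookup pass with a single sort followed by itertools.groupby over consecutive runs of equal primes.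
import Mathlib
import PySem

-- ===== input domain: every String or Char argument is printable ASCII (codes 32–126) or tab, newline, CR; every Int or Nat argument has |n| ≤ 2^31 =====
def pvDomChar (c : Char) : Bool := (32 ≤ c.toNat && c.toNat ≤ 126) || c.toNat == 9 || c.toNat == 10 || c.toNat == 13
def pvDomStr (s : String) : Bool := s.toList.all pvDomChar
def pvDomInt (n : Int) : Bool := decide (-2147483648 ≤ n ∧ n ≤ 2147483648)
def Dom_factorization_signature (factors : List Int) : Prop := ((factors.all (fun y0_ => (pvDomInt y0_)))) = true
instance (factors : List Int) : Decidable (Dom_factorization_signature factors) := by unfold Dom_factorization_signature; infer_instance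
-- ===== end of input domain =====

-- B builds the signature by sorting once and grouping consecutive runs, instead of A's count-dict + sorted-keys pass.

-- ===== PORT A =====
def factorization_signature (factors : List Int) : String :=
  if factors = [] then "1"
  else
    let factor_counts : PySem.Dict Int Int :=
      factors.foldl (fun d f => d.modify f 0 (· + 1)) PySem.Dict.empty
    let signature_parts : List String :=
      (PySem.List.sorted factor_counts.keys (fun x => x) false).foldl
        (fun acc prime =>
          let count := factor_counts.getD prime 0
          acc ++ [if count = 1 then PySem.Int.toStr prime
                  else PySem.Int.toStr prime ++ "^" ++ PySem.Int.toStr count]) []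
    PySem.Str.join "*" signature_parts

-- ===== PORT B =====
-- each step takes the run of elements equal to the head (itertools.groupby on a sorted list)
def fsGroupParts : List Int → List String
  | [] => []
  | x :: rest =>
    let run := rest.takeWhile (fun y => y == x)
    (if run.length = 0 then PySem.Int.toStr x
     else PySem.Int.toStr x ++ "^" ++ PySem.Int.toStr (1 + (run.length : Int)))
      :: fsGroupParts (rest.dropWhile (fun y => y == x))
termination_by l => l.length
decreasing_by
  have := List.length_dropWhile_le (fun y => y == x) rest
  simp; omega

def factorization_signature_alt (factors : List Int) : String :=
  if factors = [] then "1"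
  else PySem.Str.join "*" (fsGroupParts (PySem.List.sorted factors (fun x => x) false))

-- ===== PRECONDITION & SPEC =====
def Spec_factorization_signature (factors : List Int) (out : String) : Prop := out = factorization_signature_alt factors
instance (factors : List Int) (out : String) : Decidable (Spec_factorization_signature factors out) := by unfold Spec_factorization_signature; infer_instance

-- ===== CLAIM (what is proved, stated in full; the proofs are below) =====
def Claim_equal_factorization_signature : Prop := ∀ (factors : List Int), Dom_factorization_signature factors → Spec_factorization_signature factors (factorization_signature factors)

-- ===== LEMMAS AND PROOFS =====

def fsPart (p : Int) (c : Nat) : String :=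
  if c = 1 then PySem.Int.toStr p else PySem.Int.toStr p ++ "^" ++ PySem.Int.toStr (c : Int)

lemma fsGroupParts_eq_map : ∀ (n : Nat) (s L : List Int), s.length ≤ n →
    s.Pairwise (· ≤ ·) → L.Pairwise (· < ·) → (∀ p, p ∈ L ↔ p ∈ s) →
    fsGroupParts s = L.map (fun p => fsPart p (s.count p))
  | _, [], L, _, _, _, hmem => by
    have hL : L = [] := by
      cases L with
      | nil => rfl
      | cons a t => exact absurd ((hmem a).1 (by simp)) (by simp)
    simp [hL, fsGroupParts]
  | 0, x :: rest, L, hlen, _, _, _ => by simp at hlen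
  | n+1, x :: rest, L, hlen, hs, hL, hmem => by
    set run := rest.takeWhile (fun y => y == x) with hrun_def
    set rest' := rest.dropWhile (fun y => y == x) with hrest'_def
    have hsplit : run ++ rest' = rest := List.takeWhile_append_dropWhile
    have hrun : ∀ y ∈ run, y = x := by
      intro y hy
      rw [hrun_def] at hy
      have hb := List.mem_takeWhile_imp (p := fun z => z == x) (l := rest) (x := y) hy
      simpa using hb
    obtain ⟨hx_le, hrest⟩ := List.pairwise_cons.1 hs
    have hrest'_sub : rest'.Sublist rest := List.dropWhile_sublist _
    have hrest'p : rest'.Pairwise (· ≤ ·) := hrest.sublist hrest'_sub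
    have hnx : ∀ z ∈ rest', x < z := by
      intro z hz
      cases hre : rest' with
      | nil => simp [hre] at hz
      | cons y t =>
        have hy_ne : ¬ ((y == x) = true) := by
          have h2 := List.head_dropWhile_not (fun y => y == x) (l := rest) (by rw [← hrest'_def, hre]; simp)
          simpa [← hrest'_def, hre] using h2
        have hyx : y ≠ x := by simpa using hy_ne
        have hy_rest : y ∈ rest := hrest'_sub.mem (by simp [hre])
        have hxy : x < y := lt_of_le_of_ne (hx_le y hy_rest) (Ne.symm hyx)
        rw [hre] at hz
        rcases List.mem_cons.1 hz with rfl | hzt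
        · exact hxy
        · have : y ≤ z := (List.pairwise_cons.1 (hre ▸ hrest'p)).1 z hzt
          exact lt_of_lt_of_le hxy this
    have hxnotin : x ∉ rest' := fun h => absurd (hnx x h) (lt_irrefl x)
    have hcount_x : (x :: rest).count x = 1 + run.length := by
      rw [List.count_cons_self, ← hsplit, List.count_append,
        List.count_eq_length.2 (fun b hb => (hrun b hb).symm),
        List.count_eq_zero.2 hxnotin]
      omega
    -- L = x :: tail
    have hxL : x ∈ L := (hmem x).2 (by simp)
    cases L with
    | nil => simp at hxL
    | cons h t =>
      obtain ⟨hh_lt, htp⟩ := List.pairwise_cons.1 hL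
      have hhx : h = x := by
        rcases List.mem_cons.1 hxL with rfl | hxt
        · rfl
        · have hhx_lt : h < x := hh_lt x hxt
          have hh_s : h ∈ x :: rest := (hmem h).1 (by simp)
          rcases List.mem_cons.1 hh_s with rfl | hhr
          · rfl
          · exact absurd (hx_le h hhr) (not_le.2 hhx_lt)
      subst hhx
      have hmem2 : ∀ p, p ∈ t ↔ p ∈ rest' := by
        intro p
        constructor
        · intro hpt
          have hpx : h < p := hh_lt p hpt
          have hps : p ∈ h :: rest := (hmem p).1 (by simp [hpt])
          rcases List.mem_cons.1 hps with rfl | hpr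
          · exact absurd hpx (lt_irrefl p)
          · rw [← hsplit] at hpr
            rcases List.mem_append.1 hpr with hprun | h'
            · exact absurd (hrun p hprun) (by intro he; rw [he] at hpx; exact lt_irrefl h hpx)
            · exact h'
        · intro hpr'
          have hpx : h < p := hnx p hpr'
          have hps : p ∈ h :: rest := by
            rw [← hsplit]; exact List.mem_cons.2 (Or.inr (List.mem_append.2 (Or.inr hpr')))
          rcases List.mem_cons.1 ((hmem p).2 hps) with rfl | hpt
          · exact absurd hpx (lt_irrefl p)
          · exact hpt
      have hcount2 : ∀ p ∈ t, (h :: rest).count p = rest'.count p := by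
        intro p hpt
        have hpx : p ≠ h := fun he => absurd (he ▸ hh_lt p hpt) (lt_irrefl h)
        rw [← hsplit, List.count_cons_of_ne (Ne.symm hpx), List.count_append,
          List.count_eq_zero.2 (fun hc => hpx (hrun p hc))]
        omega
      have hlen2 : rest'.length ≤ n := by
        have hd := List.length_dropWhile_le (fun y => y == h) rest
        rw [← hrest'_def] at hd
        simp at hlen
        omega
      have ih := fsGroupParts_eq_map n rest' t hlen2 hrest'p htp hmem2
      rw [fsGroupParts]
      simp only [← hrest'_def, ← hrun_def, List.map_cons, ih]
      congr 1
      · rw [hcount_x, fsPart]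
        by_cases h0 : run.length = 0
        · simp [h0]
        · rw [if_neg h0, if_neg (by omega)]
          norm_cast
      · exact (List.map_congr_left fun p hp => by rw [hcount2 p hp]).symm

theorem factorization_signature_spec : Claim_equal_factorization_signature := by
  intro factors _
  unfold Spec_factorization_signature factorization_signature factorization_signature_alt
  by_cases hf : factors = []
  · simp [hf]
  · simp only [if_neg hf]
    have hpair1 : (PySem.List.sorted factors (fun x => x) false).Pairwise (· ≤ ·) := by
      simpa using PySem.List.sorted_pairwise (xs := factors) (key := fun x => x)
    have hpair2 : (PySem.List.sorted (PySem.Set.ofList factors) (fun x => x) false).Pairwise (· < ·) :=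
      PySem.List.sorted_ofList_pairwise_lt factors
    have hmem : ∀ p, p ∈ PySem.List.sorted (PySem.Set.ofList factors) (fun x => x) false ↔
        p ∈ PySem.List.sorted factors (fun x => x) false := by
      intro p
      simp [PySem.List.mem_sorted, PySem.Set.mem_ofList]
    have hkey := fsGroupParts_eq_map (PySem.List.sorted factors (fun x => x) false).length
      (PySem.List.sorted factors (fun x => x) false)
      (PySem.List.sorted (PySem.Set.ofList factors) (fun x => x) false)
      le_rfl hpair1 hpair2 hmem
    rw [hkey, ← PySem.Dict.counter_eq_foldl]
    simp only [PySem.Dict.keys_counter, PySem.Dict.getD_counter]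
    rw [PySem.List.foldl_append_singleton_eq_map]
    congr 1
    apply List.map_congr_left
    intro p hp
    have hc : (PySem.List.sorted factors (fun x => x) false).count p = factors.count p :=
      (PySem.List.sorted_perm factors (fun x => x) false).count_eq p
    rw [hc, fsPart]
    by_cases h1 : factors.count p = 1
    · simp [h1]
    · rw [if_neg h1, if_neg (by exact_mod_cast h1)]
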